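-- pv_equiv track=rewrite | github.com/talvola/bandcampsync | bandcampsync/download.py | mask_sig
-- ===== SOURCE A (Python) =====
-- def mask_sig(url):
--     if "&sig=" not in url:
--         return url
--     url_parts = url.split("&")
--     for i, url_part in enumerate(url_parts):
--         if url_part[:4] == "sig=":
--             url_parts[i] = "sig=[masked]"
--         elif url_part[:6] == "token=":
--             url_parts[i] = "token=[masked]"
--     return "&".join(url_parts)
-- ===== SOURCE B (Python) =====
-- def _mask_part(part):
--     if part.startswith("sig="):
--         return "sig=[masked]"
--     if part.startswith("token="):
--         return "token=[masked]"
--     return part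
--
--
-- def mask_sig(url):
--     # Same guard as the original: nothing is masked unless an "&sig=" is present.
--     if "&sig=" not in url:
--         return url
--     # Single streaming pass over the characters instead of split / index-loop / join.
--     out = []
--     part = ""
--     for ch in url:
--         if ch == "&":
--             out.append(_mask_part(part))
--             out.append("&")
--             part = ""
--         else:
--             part += ch
--     out.append(_mask_part(part))
--     return "".join(out)
-- ===== Notes on version B (the rewrite author's own statement) =====
-- stated objective: alternative
-- what changed: Replaces A's split / index-mutating enumerate loop / join pipeline with a single streaming pass over the characters that masks each part as its terminating separator (or the end) is reached; A's early-return guard that requires a sig parameter after a separator is kept unchanged.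
import Mathlib
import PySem

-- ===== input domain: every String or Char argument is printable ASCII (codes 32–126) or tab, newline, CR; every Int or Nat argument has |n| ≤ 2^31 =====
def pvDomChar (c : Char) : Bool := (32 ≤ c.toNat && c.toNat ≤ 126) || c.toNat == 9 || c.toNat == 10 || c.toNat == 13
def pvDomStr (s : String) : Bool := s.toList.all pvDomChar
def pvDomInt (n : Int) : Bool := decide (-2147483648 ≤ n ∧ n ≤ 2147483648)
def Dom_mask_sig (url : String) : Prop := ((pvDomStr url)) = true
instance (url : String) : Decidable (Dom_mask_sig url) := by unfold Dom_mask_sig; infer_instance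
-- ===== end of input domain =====

-- B replaces A's split / index-mutating loop / join by one streaming character pass (objective: alternative, same cost).

-- ===== PORT A =====
def mask_sig (url : String) : String :=
  if !(PySem.Str.isIn "&sig=" url) then url
  else
    let url_parts := PySem.Chars.splitOn url.toList "&".toList
    let url_parts :=
      (PySem.List.enumerate url_parts 0).foldl
        (fun ps ip =>
          if PySem.List.slice ip.2 none (some 4) = "sig=".toList then
            ps.set ip.1.toNat "sig=[masked]".toList
          else if PySem.List.slice ip.2 none (some 6) = "token=".toList then
            ps.set ip.1.toNat "token=[masked]".toList
          else ps)
        url_parts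
    String.ofList (PySem.Chars.join "&".toList url_parts)

-- ===== PORT B =====
def maskPartB (p : List Char) : List Char :=
  if PySem.Chars.startswith p "sig=".toList then "sig=[masked]".toList
  else if PySem.Chars.startswith p "token=".toList then "token=[masked]".toList
  else p

def mask_sig_alt (url : String) : String :=
  if !(PySem.Str.isIn "&sig=" url) then url
  else
    let st := url.toList.foldl
      (fun (s : List (List Char) × List Char) ch =>
        if ch = '&' then (s.1 ++ [maskPartB s.2] ++ [['&']], [])
        else (s.1, s.2 ++ [ch]))
      ([], [])
    String.ofList (PySem.Chars.join [] (st.1 ++ [maskPartB st.2]))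

-- ===== PRECONDITION & SPEC =====
def Spec_mask_sig (url : String) (out : String) : Prop := out = mask_sig_alt url
instance (url : String) (out : String) : Decidable (Spec_mask_sig url out) := by unfold Spec_mask_sig; infer_instance

-- ===== CLAIM (what is proved, stated in full; the proofs are below) =====
def Claim_equal_mask_sig : Prop := ∀ (url : String), Dom_mask_sig url → Spec_mask_sig url (mask_sig url)

-- ===== LEMMAS AND PROOFS =====

-- A's per-part rewrite, written with A's slices.
def maskPartA (p : List Char) : List Char :=
  if PySem.List.slice p none (some 4) = "sig=".toList then "sig=[masked]".toList
  else if PySem.List.slice p none (some 6) = "token=".toList then "token=[masked]".toList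
  else p

lemma maskPartA_eq_maskPartB (p : List Char) : maskPartA p = maskPartB p := by
  have h4 : PySem.List.slice p none (some 4) = List.take 4 p :=
    PySem.List.slice_to p (by norm_num)
  have h6 : PySem.List.slice p none (some 6) = List.take 6 p :=
    PySem.List.slice_to p (by norm_num)
  have hs : (List.take 4 p = "sig=".toList) ↔ (PySem.Chars.startswith p "sig=".toList = true) := by
    rw [PySem.Chars.startswith_iff, List.prefix_iff_eq_take]
    exact ⟨fun h => h.symm, fun h => h.symm⟩
  have ht : (List.take 6 p = "token=".toList) ↔ (PySem.Chars.startswith p "token=".toList = true) := by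
    rw [PySem.Chars.startswith_iff, List.prefix_iff_eq_take]
    exact ⟨fun h => h.symm, fun h => h.symm⟩
  unfold maskPartA maskPartB
  rw [h4, h6]
  by_cases c1 : List.take 4 p = "sig=".toList
  · rw [if_pos c1, if_pos (hs.mp c1)]
  · rw [if_neg c1, if_neg (fun h => c1 (hs.mpr h))]
    by_cases c2 : List.take 6 p = "token=".toList
    · rw [if_pos c2, if_pos (ht.mp c2)]
    · rw [if_neg c2, if_neg (fun h => c2 (ht.mpr h))]

-- The list of '&'-separated parts of l, with cur the (reversed) chars of the current part.
def partsFrom : List Char → List Char → List (List Char)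
  | [], cur => [cur.reverse]
  | c :: rest, cur =>
      if c = '&' then cur.reverse :: partsFrom rest [] else partsFrom rest (c :: cur)

lemma partsFrom_ne_nil (l cur : List Char) : partsFrom l cur ≠ [] := by
  induction l generalizing cur with
  | nil => simp [partsFrom]
  | cons c rest ih =>
      by_cases hc : c = '&' <;> simp [partsFrom, hc, ih]

lemma splitOn_go_eq (fuel : Nat) (l cur : List Char) (acc : List (List Char))
    (h : l.length < fuel) :
    PySem.Chars.splitOn.go ['&'] fuel l cur acc = acc.reverse ++ partsFrom l cur := by
  induction fuel generalizing l cur acc with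
  | zero => omega
  | succ fuel ih =>
      cases l with
      | nil =>
          rw [PySem.Chars.splitOn.go]
          simp [partsFrom]
          all_goals omega
      | cons c rest =>
          simp only [List.length_cons] at h
          by_cases hc : c = '&'
          · subst hc
            have hstep : PySem.Chars.splitOn.go ['&'] (fuel+1) ('&' :: rest) cur acc
                = PySem.Chars.splitOn.go ['&'] fuel rest [] (cur.reverse :: acc) := by
              rw [PySem.Chars.splitOn.go]; simp [List.isPrefixOf]
            rw [hstep, ih rest [] (cur.reverse :: acc) (by omega)]
            simp [partsFrom]
          · have hstep : PySem.Chars.splitOn.go ['&'] (fuel+1) (c :: rest) cur acc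
                = PySem.Chars.splitOn.go ['&'] fuel rest (c :: cur) acc := by
              rw [PySem.Chars.splitOn.go]; simp [List.isPrefixOf, Ne.symm hc]
            rw [hstep, ih rest (c :: cur) acc (by omega)]
            simp [partsFrom, hc]

lemma splitOn_eq_partsFrom (s : List Char) :
    PySem.Chars.splitOn s ['&'] = partsFrom s [] := by
  unfold PySem.Chars.splitOn
  rw [splitOn_go_eq (s.length + 1) s [] [] (by omega)]
  simp

-- A's enumerate/set loop is the pointwise map of maskPartA.
lemma foldl_set_enum (l pre : List (List Char)) :
    (PySem.List.enumerate l (pre.length : Int)).foldl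
      (fun ps ip =>
        if PySem.List.slice ip.2 none (some 4) = "sig=".toList then
          ps.set ip.1.toNat "sig=[masked]".toList
        else if PySem.List.slice ip.2 none (some 6) = "token=".toList then
          ps.set ip.1.toNat "token=[masked]".toList
        else ps)
      (pre ++ l) = pre ++ l.map maskPartA := by
  induction l generalizing pre with
  | nil => simp [PySem.List.enumerate_nil]
  | cons x rest ih =>
      rw [PySem.List.enumerate_cons]
      simp only [List.foldl_cons]
      have hset : ∀ v : List Char, (pre ++ x :: rest).set ((pre.length : Int)).toNat v
          = (pre ++ [v]) ++ rest := by
        intro v; simp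
      have hnext : (pre.length : Int) + 1 = (((pre ++ [maskPartA x]).length : Nat) : Int) := by
        simp
      by_cases c1 : PySem.List.slice x none (some 4) = "sig=".toList
      · rw [if_pos c1, hset]
        have hx : maskPartA x = "sig=[masked]".toList := by unfold maskPartA; rw [if_pos c1]
        rw [show (pre.length : Int) + 1 = (((pre ++ ["sig=[masked]".toList]).length : Nat) : Int) by simp]
        rw [ih (pre ++ ["sig=[masked]".toList])]
        simp [hx]
      · rw [if_neg c1]
        by_cases c2 : PySem.List.slice x none (some 6) = "token=".toList
        · rw [if_pos c2, hset]
          have hx : maskPartA x = "token=[masked]".toList := by unfold maskPartA; rw [if_neg c1, if_pos c2]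
          rw [show (pre.length : Int) + 1 = (((pre ++ ["token=[masked]".toList]).length : Nat) : Int) by simp]
          rw [ih (pre ++ ["token=[masked]".toList])]
          simp [hx]
        · rw [if_neg c2]
          have hx : maskPartA x = x := by unfold maskPartA; rw [if_neg c1, if_neg c2]
          rw [show (pre ++ x :: rest) = (pre ++ [x]) ++ rest by simp,
              show (pre.length : Int) + 1 = (((pre ++ [x]).length : Nat) : Int) by simp]
          rw [ih (pre ++ [x])]
          simp [hx]

lemma join_nil_flatten (xs : List (List Char)) : PySem.Chars.join [] xs = xs.flatten := by
  simp only [PySem.Chars.join, List.intercalate]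
  induction xs with
  | nil => simp
  | cons h t ih => cases t <;> simp_all [List.intersperse]

-- B's streaming pass computes join-&-of-masked-parts.
lemma b_inv (l : List Char) (out : List (List Char)) (part : List Char) :
    ((l.foldl
        (fun (s : List (List Char) × List Char) ch =>
          if ch = '&' then (s.1 ++ [maskPartB s.2] ++ [['&']], [])
          else (s.1, s.2 ++ [ch])) (out, part)).1
      ++ [maskPartB (l.foldl
        (fun (s : List (List Char) × List Char) ch =>
          if ch = '&' then (s.1 ++ [maskPartB s.2] ++ [['&']], [])
          else (s.1, s.2 ++ [ch])) (out, part)).2]).flatten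
    = out.flatten ++ PySem.Chars.join ['&'] ((partsFrom l part.reverse).map maskPartB) := by
  induction l generalizing out part with
  | nil => simp [partsFrom, PySem.Chars.join_singleton]
  | cons c rest ih =>
      by_cases hc : c = '&'
      · subst hc
        simp only [List.foldl_cons, reduceIte]
        rw [ih (out ++ [maskPartB part] ++ [['&']]) []]
        obtain ⟨h, t, hht⟩ : ∃ h t, partsFrom rest [] = h :: t := by
          cases hp : partsFrom rest [] with
          | nil => exact absurd hp (partsFrom_ne_nil rest [])
          | cons h t => exact ⟨h, t, rfl⟩
        simp [partsFrom, hht, PySem.Chars.join_cons_cons]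
      · simp only [List.foldl_cons, if_neg hc]
        rw [ih out (part ++ [c])]
        simp [partsFrom, hc]

-- ===== VERDICT (by name: the statement is the Claim_ definition above) =====
theorem mask_sig_spec : Claim_equal_mask_sig := by
  intro url _
  unfold Spec_mask_sig mask_sig mask_sig_alt
  cases hin : PySem.Str.isIn "&sig=" url with
  | false => simp only [Bool.not_false, if_true]
  | true =>
    simp only [Bool.not_true, Bool.false_eq_true, if_false]
    congr 1
    have hsep : "&".toList = ['&'] := rfl
    rw [hsep, splitOn_eq_partsFrom]
    have hA := foldl_set_enum (partsFrom url.toList []) []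
    simp only [List.nil_append, List.length_nil, Nat.cast_zero] at hA
    rw [hA]
    have hB := b_inv url.toList [] []
    simp only [List.flatten_nil, List.nil_append, List.reverse_nil] at hB
    rw [join_nil_flatten, hB]
    congr 1
    exact List.map_congr_left (fun p _ => maskPartA_eq_maskPartB p)
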